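-- pv_equiv track=rewrite | github.com/RubADuckDuck/SFENO_temporary | sfeno/models/cellbox.py | get_node_ss_clt
-- ===== SOURCE A (Python) =====
-- def get_node_ss_clt(node_part_idxes):
--     node_subs_collection = []
--
--     for i, part_idx in enumerate(node_part_idxes):
--         if i == 0:
--             cur_subset = [j for j in range(0, node_part_idxes[i])]
--         else:
--             cur_subset = [j for j in range(node_part_idxes[i - 1], node_part_idxes[i])]
--
--         node_subs_collection.append(cur_subset)
--
--     return node_subs_collection
-- ===== SOURCE B (Python) =====
-- def get_node_ss_clt(node_part_idxes):
--     def seg(lo, hi):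
--         # build [lo, lo+1, ..., hi-1] by an explicit counting loop
--         out = []
--         while lo < hi:
--             out.append(lo)
--             lo += 1
--         return out
--
--     def go(prev, rest):
--         # recursion on the boundary list, threading the running lower bound
--         if not rest:
--             return []
--         return [seg(prev, rest[0])] + go(rest[0], rest[1:])
--
--     return go(0, node_part_idxes)
-- ===== Notes on version B (the rewrite author's own statement) =====
-- stated objective: alternative
-- what changed: B replaces A's indexed enumerate loop (with an i==0 special case and list indexing / range comprehensions) by structural recursion on the boundary list threading the running lower bound, and builds each segment with an explicit counting while-loop instead of range().
import Mathlib
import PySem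

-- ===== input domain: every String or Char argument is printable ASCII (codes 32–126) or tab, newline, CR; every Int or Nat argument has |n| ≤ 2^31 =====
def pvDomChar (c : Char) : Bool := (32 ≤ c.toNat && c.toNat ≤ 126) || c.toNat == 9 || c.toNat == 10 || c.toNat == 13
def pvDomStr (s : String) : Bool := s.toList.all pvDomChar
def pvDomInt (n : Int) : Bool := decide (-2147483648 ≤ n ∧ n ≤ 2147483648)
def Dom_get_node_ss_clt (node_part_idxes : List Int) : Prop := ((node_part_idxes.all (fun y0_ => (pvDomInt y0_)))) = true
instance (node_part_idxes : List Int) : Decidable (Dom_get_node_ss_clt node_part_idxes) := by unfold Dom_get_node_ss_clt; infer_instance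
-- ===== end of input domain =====

-- B replaces A's indexed enumerate loop (i == 0 special case, list indexing, range
-- comprehensions) by structural recursion on the boundary list threading the running
-- lower bound, each segment built by an explicit counting loop (alternative; same cost).

-- ===== PORT A =====
-- literal port of A: for i, part_idx in enumerate(...): build cur_subset by indexing, append
def get_node_ss_clt (node_part_idxes : List Int) : List (List Int) :=
  (PySem.List.enumerate node_part_idxes).foldl
    (fun node_subs_collection p =>
      let i := p.1
      let cur_subset :=
        if i == 0 then
          PySem.List.pyRange 0 (PySem.List.pyGetD node_part_idxes i 0) 1
        else
          PySem.List.pyRange (PySem.List.pyGetD node_part_idxes (i - 1) 0)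
                             (PySem.List.pyGetD node_part_idxes i 0) 1
      node_subs_collection ++ [cur_subset])
    []
    -- the indices i and i-1 are always in range, so pyGetD's default 0 is never used (exact)

-- ===== PORT B =====
-- port of Source B's seg: while lo < hi: append lo; lo += 1  (terminates on (hi - lo).toNat)
def segB (lo hi : Int) : List Int :=
  if lo < hi then lo :: segB (lo + 1) hi else []
termination_by (hi - lo).toNat
decreasing_by omega

-- port of Source B's go: recursion on the list, threading prev
def goB (prev : Int) (rest : List Int) : List (List Int) :=
  match rest with
  | [] => []
  | x :: xs => [segB prev x] ++ goB x xs

def get_node_ss_clt_alt (node_part_idxes : List Int) : List (List Int) :=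
  goB 0 node_part_idxes

-- ===== PRECONDITION & SPEC =====
def Spec_get_node_ss_clt (node_part_idxes : List Int) (out : List (List Int)) : Prop := out = get_node_ss_clt_alt node_part_idxes
instance (node_part_idxes : List Int) (out : List (List Int)) : Decidable (Spec_get_node_ss_clt node_part_idxes out) := by unfold Spec_get_node_ss_clt; infer_instance

-- ===== CLAIM (what is proved, stated in full; the proofs are below) =====
def Claim_equal_get_node_ss_clt : Prop := ∀ (node_part_idxes : List Int), Dom_get_node_ss_clt node_part_idxes → Spec_get_node_ss_clt node_part_idxes (get_node_ss_clt node_part_idxes)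

-- ===== LEMMAS AND PROOFS =====

theorem segB_eq_pyRange (lo hi : Int) : segB lo hi = PySem.List.pyRange lo hi 1 := by
  unfold segB
  split
  · rw [PySem.List.pyRange_one_cons (by assumption), segB_eq_pyRange (lo + 1) hi]
  · rw [PySem.List.pyRange_one_eq_nil (by omega)]
termination_by (hi - lo).toNat
decreasing_by omega

theorem goB_eq_zip_map (prev : Int) (xs : List Int) :
    goB prev xs = (List.zip (prev :: xs) xs).map (fun p => PySem.List.pyRange p.1 p.2 1) := by
  induction xs generalizing prev with
  | nil => rfl
  | cons x xs ih => simp [goB, segB_eq_pyRange, ih]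

theorem get_node_ss_clt_eq_map (xs : List Int) :
    get_node_ss_clt xs =
      (PySem.List.enumerate xs).map
        (fun p =>
          if p.1 == 0 then
            PySem.List.pyRange 0 (PySem.List.pyGetD xs p.1 0) 1
          else
            PySem.List.pyRange (PySem.List.pyGetD xs (p.1 - 1) 0)
                               (PySem.List.pyGetD xs p.1 0) 1) := by
  unfold get_node_ss_clt
  rw [PySem.List.foldl_append_singleton_eq_map]
  simp

theorem get_node_ss_clt_spec' (xs : List Int) :
    get_node_ss_clt xs = get_node_ss_clt_alt xs := by
  rw [get_node_ss_clt_eq_map]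
  unfold get_node_ss_clt_alt
  rw [goB_eq_zip_map]
  apply List.ext_getElem
  · simp [PySem.List.length_enumerate]
  · intro k h1 h2
    have hk : k < xs.length := by
      simpa [PySem.List.length_enumerate] using h1
    simp only [List.getElem_map, PySem.List.getElem_enumerate, List.getElem_zip]
    rcases k with _ | n
    · simp [PySem.List.pyGetD_of_nonneg, List.getD_eq_getElem?_getD,
            List.getElem?_eq_getElem hk]
    · have hn : n < xs.length := Nat.lt_of_succ_lt hk
      have e1 : ((0 : Int) + (n + 1 : Nat)) = ((n + 1 : Nat) : Int) := by push_cast; ring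
      have e2 : (((n + 1 : Nat) : Int) - 1) = ((n : Nat) : Int) := by push_cast; ring
      rw [e1, if_neg (by simp only [beq_iff_eq]; omega), e2]
      simp only [PySem.List.pyGetD_natCast, List.getElem_cons_succ]
      rw [List.getD_eq_getElem?_getD, List.getD_eq_getElem?_getD,
          List.getElem?_eq_getElem hk, List.getElem?_eq_getElem hn]
      rfl

-- ===== VERDICT (by name: the statement is the Claim_ definition above) =====
theorem get_node_ss_clt_spec : Claim_equal_get_node_ss_clt := by
  intro xs _
  unfold Spec_get_node_ss_clt
  exact get_node_ss_clt_spec' xs
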